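-- pv_equiv track=rewrite | github.com/matthewlabrecque/matlab-julia-transpiler | main.py | translate_expression
-- ===== SOURCE A (Python) =====
-- MATLAB_JULIA_LIB = {
--     "sin": "sin",
--     "cos": "cos",
--     "tan": "tan",
--     "exp": "exp",
--     "sqrt": "sqrt",
--     "log": "log",
--     "eye": "eye",
--     "zeros": "zeros",
-- }
--
-- SPECIAL_CHATS = {"pi": "π"}
--
-- def convert_literal(expr: str) -> str:
--     """
--     Convert a literal MATLAB expression to Julia syntax.
--     Currently a pass-through; extend for things like 1i -> 1im.
--     """
--     return expr.strip()
--
-- def translate_expression(matlab_input: str) -> str: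
--     """
--     Parse a MATLAB-style expression string and convert function calls
--     to Julia equivalents. Handles nested function calls by resolving
--     innermost parentheses first via a stack.
--     """
--
--     stack = []  # frames: (function_name, prefix_before_call)
--     current = ""  # text accumulated at the current nesting level
--
--     for ch in matlab_input:
--         if ch == "(":
--             # Identify function name immediately before this '('
--             j = len(current) - 1
--             while j >= 0 and (current[j].isalnum() or current[j] == "_"):
--                 j -= 1
--             func_name = current[j + 1 :] if j < len(current) - 1 else ""
--             prefix = current[: j + 1]
--             stack.append((func_name, prefix))
--             current = ""
--         elif ch == ")":
--             func_name, prefix = stack.pop()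
--             if func_name and func_name in MATLAB_JULIA_LIB:
--                 args = (
--                     [a.strip() for a in current.split(",")] if current.strip() else []
--                 )
--                 julia_func = MATLAB_JULIA_LIB[func_name]
--                 resolved = f"{julia_func}({', '.join(args)})"
--             elif (
--                 func_name in SPECIAL_CHATS
--             ):  # Special case for characters such as pi which are unicode in Julia
--                 julia_func = SPECIAL_CHATS[func_name]
--                 resolved = f"{julia_func}"
--             elif func_name:
--                 resolved = f"{func_name}({current})"
--             else:
--                 resolved = f"({convert_literal(current)})"
--             current = prefix + resolved
--         else:
--             current += ch
--
--     return current
-- ===== SOURCE B (Python) =====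
-- KNOWN_FUNCS = {"sin", "cos", "tan", "exp", "sqrt", "log", "eye", "zeros"}
--
--
-- def translate_expression(matlab_input: str) -> str:
--     """Recursive-descent rewrite: each parenthesised group is consumed by direct
--     recursion on the string (no explicit stack machine); library calls are
--     recognised by set membership (the MATLAB->Julia table is the identity).
--     An unterminated group propagates its partial translation outward, like the
--     original translator."""
--     s = matlab_input
--     n = len(s)
--
--     def emit(name, body):
--         if name in KNOWN_FUNCS:
--             if body.strip():
--                 return name + "(" + ", ".join(a.strip() for a in body.split(",")) + ")"
--             return name + "()"
--         if name == "pi":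
--             return "\u03c0"
--         if name:
--             return name + "(" + body + ")"
--         return "(" + body.strip() + ")"
--
--     def split_name(text):
--         k = len(text)
--         while k > 0 and (text[k - 1].isalnum() or text[k - 1] == "_"):
--             k -= 1
--         return text[k:], text[:k]
--
--     def parse(i):
--         # Consume characters from position i up to the ')' closing this level;
--         # return (translated text, next position, closed?).  If the input ends
--         # before the closing ')', the group's partial text is the result.
--         cur = ""
--         while i < n:
--             ch = s[i]
--             if ch == "(":
--                 name, prefix = split_name(cur)
--                 inner, i, closed = parse(i + 1)
--                 if not closed:
--                     return inner, i, False
--                 cur = prefix + emit(name, inner)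
--             elif ch == ")":
--                 return cur, i + 1, True
--             else:
--                 cur += ch
--                 i += 1
--         return cur, i, False
--
--     out, _, _ = parse(0)
--     return out
-- ===== Notes on version B (the rewrite author's own statement) =====
-- stated objective: alternative
-- what changed: Replaces A's character-by-character loop with an explicit stack of (name, prefix) frames and dict lookups by a recursive-descent parser that consumes each parenthesised group by direct recursion on the string and recognises library calls by set membership (the table is the identity map).
import Mathlib
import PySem

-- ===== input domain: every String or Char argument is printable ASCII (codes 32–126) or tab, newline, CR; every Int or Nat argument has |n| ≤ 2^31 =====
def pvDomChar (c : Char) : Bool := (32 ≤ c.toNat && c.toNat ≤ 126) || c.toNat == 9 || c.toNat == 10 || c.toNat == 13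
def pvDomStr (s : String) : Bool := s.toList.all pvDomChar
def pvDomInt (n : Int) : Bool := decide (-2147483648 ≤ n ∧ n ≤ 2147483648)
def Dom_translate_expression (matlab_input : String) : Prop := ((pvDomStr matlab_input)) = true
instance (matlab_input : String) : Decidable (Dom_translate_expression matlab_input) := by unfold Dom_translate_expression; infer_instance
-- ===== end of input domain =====

-- B replaces A's character-by-character stack machine (dict lookups) with a recursive-descent
-- parser using set membership; same return value on every input A accepts (Pre_).


-- ===== PORT A =====
def pvNameChar (c : Char) : Bool := PySem.Chars.isalnum c || c == '_'

def pvLib : PySem.Dict (List Char) (List Char) :=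
  PySem.Dict.mk [(['s','i','n'], ['s','i','n']), (['c','o','s'], ['c','o','s']), (['t','a','n'], ['t','a','n']),
   (['e','x','p'], ['e','x','p']), (['s','q','r','t'], ['s','q','r','t']), (['l','o','g'], ['l','o','g']),
   (['e','y','e'], ['e','y','e']), (['z','e','r','o','s'], ['z','e','r','o','s'])]

def pvSpecial : PySem.Dict (List Char) (List Char) := PySem.Dict.mk [(['p','i'], ['π'])]

-- the ')'-branch of A: turn a finished call into Julia text
def pvResolve (name cur : List Char) : List Char :=
  if !name.isEmpty && (PySem.Dict.get? pvLib name).isSome then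
    let args := if !(PySem.Chars.strip cur).isEmpty
                then (PySem.Chars.splitOn cur [',']).map PySem.Chars.strip else []
    (PySem.Dict.get? pvLib name).getD [] ++ '(' :: (PySem.Chars.join [',', ' '] args ++ [')'])
  else if (PySem.Dict.get? pvSpecial name).isSome then
    (PySem.Dict.get? pvSpecial name).getD []
  else if !name.isEmpty then
    name ++ '(' :: (cur ++ [')'])
  else
    '(' :: (PySem.Chars.strip cur ++ [')'])   -- convert_literal = strip

-- A's backwards j-scan over `current`, transliterated as a walk over the reversed list:
-- returns (reversed func_name, reversed prefix)
def pvScanA : List Char → List Char × List Char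
  | [] => ([], [])
  | c :: t => if pvNameChar c then let (n, p) := pvScanA t; (c :: n, p) else ([], c :: t)

-- one iteration of A's `for ch in matlab_input` loop; state = (stack, current)
def pvStepA (st : List (List Char × List Char) × List Char) (ch : Char) :
    List (List Char × List Char) × List Char :=
  if ch = '(' then
    let (rn, rp) := pvScanA st.2.reverse
    ((rn.reverse, rp.reverse) :: st.1, [])
  else if ch = ')' then
    match st.1 with
    | [] => st                       -- Python raises IndexError here; outside Pre_
    | (f, p) :: rest => (rest, p ++ pvResolve f st.2)
  else (st.1, st.2 ++ [ch])

def translate_expression (matlab_input : String) : String :=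
  String.ofList (matlab_input.toList.foldl pvStepA ([], [])).2

-- ===== PORT B =====
-- B recognises library calls by set membership (the MATLAB→Julia table is the identity map)
def pvKnown : List (List Char) :=
  [['s','i','n'], ['c','o','s'], ['t','a','n'], ['e','x','p'],
   ['s','q','r','t'], ['l','o','g'], ['e','y','e'], ['z','e','r','o','s']]

-- B's `emit`
def pvEmit (name body : List Char) : List Char :=
  if pvKnown.contains name then
    if !(PySem.Chars.strip body).isEmpty then
      name ++ '(' :: (PySem.Chars.join [',', ' ']
        ((PySem.Chars.splitOn body [',']).map PySem.Chars.strip) ++ [')'])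
    else name ++ ['(', ')']
  else if name = ['p','i'] then ['π']
  else if !name.isEmpty then name ++ '(' :: (body ++ [')'])
  else '(' :: (PySem.Chars.strip body ++ [')'])

-- B's `split_name`: the trailing run of name characters, taken from the right
def pvSplitName (cur : List Char) : List Char × List Char :=
  ((cur.reverse.takeWhile fun c => PySem.Chars.isalnum c || c == '_').reverse,
   (cur.reverse.dropWhile fun c => PySem.Chars.isalnum c || c == '_').reverse)

-- B's `parse(i)`: consume up to the ')' closing this level; result = (text, remainder, closed?);
-- an unterminated group propagates its partial text outward.
-- fuel = number of remaining characters (B's while-loop index always advances)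
def pvParse : Nat → List Char → List Char → List Char × List Char × Bool
  | _, [], cur => (cur, [], false)
  | 0, cs, cur => (cur, cs, false)          -- fuel guard, unreachable for fuel ≥ length
  | f + 1, c :: rest, cur =>
    if c = '(' then
      let (name, pre) := pvSplitName cur
      let r := pvParse f rest []
      if r.2.2 then pvParse f r.2.1 (pre ++ pvEmit name r.1)
      else (r.1, r.2.1, false)
    else if c = ')' then (cur, rest, true)
    else pvParse f rest (cur ++ [c])

def translate_expression_alt (matlab_input : String) : String :=
  String.ofList (pvParse matlab_input.toList.length matlab_input.toList []).1

-- ===== PRECONDITION & SPEC =====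
-- running paren credit: pvOkI d cs = "no prefix of cs closes more than d + its opens"
def pvOkI (d : Int) : List Char → Bool
  | [] => true
  | c :: t => if c = '(' then pvOkI (d + 1) t
              else if c = ')' then decide (0 < d) && pvOkI (d - 1) t
              else pvOkI d t

-- Pre_ excludes exactly the inputs on which A raises IndexError (a closing parenthesis with no matching opening one before it)
def Pre_translate_expression (matlab_input : String) : Prop :=
  pvOkI 0 matlab_input.toList = true
instance (matlab_input : String) : Decidable (Pre_translate_expression matlab_input) := by
  unfold Pre_translate_expression; infer_instance

def pvWitness_translate_expression : String := "f(sin(2,3))+pi()"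

def Spec_translate_expression (matlab_input : String) (out : String) : Prop :=
  out = translate_expression_alt matlab_input
instance (matlab_input : String) (out : String) : Decidable (Spec_translate_expression matlab_input out) := by
  unfold Spec_translate_expression; infer_instance

-- ===== CLAIM (what is proved, stated in full; the proofs are below) =====
def Claim_equal_translate_expression : Prop := ∀ (matlab_input : String), Dom_translate_expression matlab_input → Pre_translate_expression matlab_input → Spec_translate_expression matlab_input (translate_expression matlab_input)

-- ===== LEMMAS AND PROOFS =====

def pvCredit (d : Int) : List Char → Int
  | [] => d
  | c :: t => if c = '(' then pvCredit (d + 1) t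
              else if c = ')' then pvCredit (d - 1) t
              else pvCredit d t

theorem pvDictNil {v : Type} (k : List Char) :
    (PySem.Dict.mk ([] : List (List Char × v))).get? k = none := rfl

-- B's membership test agrees with A's dict lookups: emit = resolve
theorem pvEmit_eq (name body : List Char) : pvEmit name body = pvResolve name body := by
  by_cases h : pvKnown.contains name = true
  · simp only [pvKnown, List.contains_cons, List.contains_nil, Bool.or_false,
      Bool.or_eq_true, beq_iff_eq] at h
    rcases h with rfl | rfl | rfl | rfl | rfl | rfl | rfl | rfl <;>
      · by_cases hb : (PySem.Chars.strip body).isEmpty <;>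
          simp [pvEmit, pvResolve, pvKnown, pvLib, hb, PySem.Chars.join,
            PySem.Dict.get?_mk_cons, List.intercalate]
  · have hlib : PySem.Dict.get? pvLib name = none := by
      simp only [pvKnown, List.contains_cons, List.contains_nil, Bool.or_false,
        Bool.or_eq_true, beq_iff_eq, not_or] at h
      obtain ⟨h1, h2, h3, h4, h5, h6, h7, h8⟩ := h
      simp [pvLib, PySem.Dict.get?_mk_cons, Ne.symm h1, Ne.symm h2, Ne.symm h3,
        Ne.symm h4, Ne.symm h5, Ne.symm h6, Ne.symm h7, Ne.symm h8, pvDictNil]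
    by_cases hpi : name = ['p','i']
    · subst hpi
      simp [pvEmit, pvResolve, pvKnown, pvSpecial, hlib, PySem.Dict.get?_mk_cons]
    · have hsp : PySem.Dict.get? pvSpecial name = none := by
        simp [pvSpecial, PySem.Dict.get?_mk_cons, Ne.symm hpi, pvDictNil]
      have h' : ¬ name ∈ pvKnown := by simpa using h
      by_cases hn : name = []
      · subst hn
        simp [pvEmit, pvResolve, pvKnown, pvSpecial, PySem.Dict.get?_mk_cons, pvDictNil]
      · simp [pvEmit, pvResolve, h', hlib, hsp, hpi, hn]

theorem pvOkI_append (a : List Char) : ∀ (d : Int) (b : List Char),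
    pvOkI d (a ++ b) = (pvOkI d a && pvOkI (pvCredit d a) b) := by
  induction a with
  | nil => intro d b; simp [pvOkI, pvCredit]
  | cons c t ih =>
    intro d b
    by_cases h1 : c = '(' <;> by_cases h2 : c = ')' <;>
      simp [pvOkI, pvCredit, h1, h2, ih, Bool.and_assoc]

theorem pvCredit_append (a : List Char) : ∀ (d : Int) (b : List Char),
    pvCredit d (a ++ b) = pvCredit (pvCredit d a) b := by
  induction a with
  | nil => intro d b; simp [pvCredit]
  | cons c t ih =>
    intro d b
    by_cases h1 : c = '(' <;> by_cases h2 : c = ')' <;> simp [pvCredit, h1, h2, ih]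

theorem pvCredit_shift (a : List Char) : ∀ (d e : Int),
    pvCredit (d + e) a = pvCredit d a + e := by
  induction a with
  | nil => intro d e; simp [pvCredit]
  | cons c t ih =>
    intro d e
    by_cases h1 : c = '('
    · simp only [pvCredit, h1, if_true]
      rw [show d + e + 1 = d + 1 + e by ring, ih]
    · by_cases h2 : c = ')'
      · subst h2
        have : pvCredit (d + e) (')' :: t) = pvCredit (d + e - 1) t := by simp [pvCredit]
        rw [this, show pvCredit d (')' :: t) = pvCredit (d - 1) t by simp [pvCredit],
          show d + e - 1 = d - 1 + e by ring, ih]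
      · simp only [pvCredit, h1, h2, if_false]
        exact ih d e

theorem pvOkI_mono (a : List Char) : ∀ (d e : Int), d ≤ e →
    pvOkI d a = true → pvOkI e a = true := by
  induction a with
  | nil => intro d e _ _; simp [pvOkI]
  | cons c t ih =>
    intro d e hde h
    by_cases h1 : c = '(' <;> by_cases h2 : c = ')' <;>
      simp_all [pvOkI]
    · exact ih _ _ (by omega) h
    · exact ⟨by omega, ih _ _ (by omega) h.2⟩
    · exact ih _ _ hde h

theorem pvScanA_eq (r : List Char) :
    pvScanA r = (r.takeWhile pvNameChar, r.dropWhile pvNameChar) := by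
  induction r with
  | nil => rfl
  | cons c t ih =>
    by_cases h : pvNameChar c <;> simp [pvScanA, List.takeWhile, List.dropWhile, h, ih]

theorem pvStepA_open (st : List (List Char × List Char) × List Char) :
    pvStepA st '(' = (((pvSplitName st.2).1, (pvSplitName st.2).2) :: st.1, []) := by
  have hfun : (fun c => PySem.Chars.isalnum c || c == '_') = pvNameChar := rfl
  simp [pvStepA, pvScanA_eq, pvSplitName, hfun]

theorem pvCredit_wrap (u x : List Char) (hcu : pvCredit 0 u = 0) :
    pvCredit 0 ('(' :: (u ++ ')' :: x)) = pvCredit 0 x := by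
  have h1 : pvCredit 0 ('(' :: (u ++ ')' :: x)) = pvCredit 1 (u ++ ')' :: x) := by
    simp [pvCredit]
  have h2 : pvCredit 1 u = 1 := by
    have := pvCredit_shift u 0 1; simp at this; omega
  rw [h1, pvCredit_append, h2]
  simp [pvCredit]

theorem pvOkI_wrap (u x : List Char) (hoku : pvOkI 0 u = true) (hcu : pvCredit 0 u = 0) :
    pvOkI 0 ('(' :: (u ++ ')' :: x)) = pvOkI 0 x := by
  have h1 : pvOkI 0 ('(' :: (u ++ ')' :: x)) = pvOkI 1 (u ++ ')' :: x) := by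
    simp [pvOkI]
  have h2 : pvCredit 1 u = 1 := by
    have := pvCredit_shift u 0 1; simp at this; omega
  rw [h1, pvOkI_append, h2, pvOkI_mono u 0 1 (by omega) hoku]
  simp [pvOkI]

theorem pvFold_wrap (u x cur : List Char) (stack : List (List Char × List Char))
    (inner : List Char)
    (hfold : List.foldl pvStepA
        ((((pvSplitName cur).1, (pvSplitName cur).2) :: stack), []) u
      = ((((pvSplitName cur).1, (pvSplitName cur).2) :: stack), inner)) :
    List.foldl pvStepA (stack, cur) ('(' :: (u ++ ')' :: x))
      = List.foldl pvStepA
          (stack, (pvSplitName cur).2 ++ pvEmit (pvSplitName cur).1 inner) x := by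
  rw [List.foldl_cons, pvStepA_open]
  rw [show u ++ ')' :: x = (u ++ [')']) ++ x by simp]
  rw [List.foldl_append, List.foldl_append, hfold]
  simp [pvStepA, pvEmit_eq]

-- the stack machine and the recursive-descent parser agree level by level:
-- a closed level is a balanced segment the fold consumes keeping the stack;
-- an unterminated level's text is exactly the fold's final `current`.
theorem pvMain : ∀ (n : Nat) (cs : List Char), cs.length ≤ n →
    ∀ (cur : List Char) (stack : List (List Char × List Char)),
    ((pvParse n cs cur).2.2 = true →
       ∃ u, cs = u ++ ')' :: (pvParse n cs cur).2.1 ∧ pvOkI 0 u = true ∧ pvCredit 0 u = 0 ∧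
         List.foldl pvStepA (stack, cur) u = (stack, (pvParse n cs cur).1))
    ∧ ((pvParse n cs cur).2.2 = false →
       (pvParse n cs cur).2.1 = [] ∧
         (List.foldl pvStepA (stack, cur) cs).2 = (pvParse n cs cur).1) := by
  intro n
  induction n with
  | zero =>
    intro cs hlen cur stack
    cases cs with
    | nil => exact ⟨by simp [pvParse], by simp [pvParse]⟩
    | cons c t => simp at hlen
  | succ f ih =>
    intro cs hlen cur stack
    cases cs with
    | nil => exact ⟨by simp [pvParse], by simp [pvParse]⟩
    | cons c rest =>
      by_cases hop : c = '('
      · subst hop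
        have hrlen : rest.length ≤ f := by simpa using hlen
        set inner := (pvParse f rest []).1 with hinner
        set rem := (pvParse f rest []).2.1 with hremdef
        by_cases hcl2 : (pvParse f rest []).2.2 = true
        · obtain ⟨u, hu, hoku, hcu, hfold⟩ :=
            (ih rest hrlen [] ((((pvSplitName cur).1, (pvSplitName cur).2)) :: stack)).1 hcl2
          rw [← hremdef] at hu
          rw [← hinner] at hfold
          have hstep : pvParse (f + 1) ('(' :: rest) cur
              = pvParse f rem ((pvSplitName cur).2 ++ pvEmit (pvSplitName cur).1 inner) := by
            simp [pvParse, hcl2, ← hinner, ← hremdef]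
          have hrem_len : rem.length ≤ f := by
            have := congrArg List.length hu; simp at this; omega
          have hfold_cs : List.foldl pvStepA (stack, cur) ('(' :: rest)
              = List.foldl pvStepA
                  (stack, (pvSplitName cur).2 ++ pvEmit (pvSplitName cur).1 inner) rem := by
            rw [hu]; exact pvFold_wrap u rem cur stack inner hfold
          obtain ⟨ihc, iho⟩ := ih rem hrem_len
            ((pvSplitName cur).2 ++ pvEmit (pvSplitName cur).1 inner) stack
          constructor
          · intro hcl
            rw [hstep] at hcl
            obtain ⟨u', hu', hoku', hcu', hfold'⟩ := ihc hcl
            refine ⟨'(' :: (u ++ ')' :: u'), ?_, ?_, ?_, ?_⟩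
            · rw [hstep]
              conv_lhs => rw [hu, hu']
              simp
            · rw [pvOkI_wrap u u' hoku hcu]; exact hoku'
            · rw [pvCredit_wrap u u' hcu]; exact hcu'
            · rw [pvFold_wrap u u' cur stack inner hfold, hstep]
              exact hfold'
          · intro hcl
            rw [hstep] at hcl
            obtain ⟨hrem2, hfold'⟩ := iho hcl
            refine ⟨?_, ?_⟩
            · rw [hstep]; exact hrem2
            · rw [hfold_cs, hstep]; exact hfold'
        · have hstep : pvParse (f + 1) ('(' :: rest) cur = (inner, rem, false) := by
            simp [pvParse, hcl2, ← hinner, ← hremdef]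
          obtain ⟨hrem2, hfold2⟩ :=
            (ih rest hrlen [] ((((pvSplitName cur).1, (pvSplitName cur).2)) :: stack)).2
              (by simpa using hcl2)
          constructor
          · intro hcl; rw [hstep] at hcl; simp at hcl
          · intro _
            rw [hstep]
            refine ⟨hrem2, ?_⟩
            rw [List.foldl_cons, pvStepA_open]
            exact hfold2
      · by_cases hcl : c = ')'
        · subst hcl
          constructor
          · intro _
            refine ⟨[], by simp [pvParse], by simp [pvOkI], by simp [pvCredit],
              by simp [pvParse]⟩
          · intro h; simp [pvParse] at h
        · have hrlen : rest.length ≤ f := by simpa using hlen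
          have hstep : pvParse (f + 1) (c :: rest) cur = pvParse f rest (cur ++ [c]) := by
            simp [pvParse, hop, hcl]
          have hstepA : pvStepA (stack, cur) c = (stack, cur ++ [c]) := by
            simp [pvStepA, hop, hcl]
          obtain ⟨ihc, iho⟩ := ih rest hrlen (cur ++ [c]) stack
          constructor
          · intro hclp
            rw [hstep] at hclp
            obtain ⟨u, hu, hoku, hcu, hfold⟩ := ihc hclp
            refine ⟨c :: u, ?_, ?_, ?_, ?_⟩
            · rw [hstep]
              conv_lhs => rw [hu]
              simp
            · simpa [pvOkI, hop, hcl] using hoku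
            · simpa [pvCredit, hop, hcl] using hcu
            · rw [List.foldl_cons, hstepA, hstep]; exact hfold
          · intro hclp
            rw [hstep] at hclp
            obtain ⟨hrem, hfold⟩ := iho hclp
            refine ⟨?_, ?_⟩
            · rw [hstep]; exact hrem
            · rw [List.foldl_cons, hstepA, hstep]; exact hfold

-- ===== VERDICT (by name: the statement is the Claim_ definition above) =====
theorem translate_expression_spec : Claim_equal_translate_expression := by
  intro s _ hpre
  unfold Spec_translate_expression
  have hok : pvOkI 0 s.toList = true := hpre
  obtain ⟨hc, ho⟩ := pvMain s.toList.length s.toList le_rfl [] []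
  by_cases hcl : (pvParse s.toList.length s.toList []).2.2 = true
  · exfalso
    obtain ⟨u, hu, hoku, hcu, _⟩ := hc hcl
    rw [hu, pvOkI_append, hcu] at hok
    simp [pvOkI, hoku] at hok
  · obtain ⟨_, hfold⟩ := ho (by simpa using hcl)
    unfold translate_expression translate_expression_alt
    rw [hfold]
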